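-- pv_equiv track=rewrite | github.com/wanderley/problem-solving | 2231.py | _nums
-- ===== SOURCE A (Python) =====
-- from itertools import filterfalse
--
-- def _nums(num:int):
--     digits = [int(d) for d in str(num)]
--     is_even = lambda d: (d % 2) == 0
--     e, o = reversed(sorted(filter(is_even, digits))), reversed(sorted(filterfalse(is_even, digits)))
--     for d in digits:
--         if is_even(d):
--             yield next(e)
--         else:
--             yield next(o)
-- ===== SOURCE B (Python) =====
-- def _nums(num: int):
--     digits = [int(d) for d in str(num)]
--     cnt = {}
--     for d in digits:
--         cnt[d] = cnt.get(d, 0) + 1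
--     cur_even, cur_odd = 8, 9
--     for d in digits:
--         if d % 2 == 0:
--             while cnt.get(cur_even, 0) == 0:
--                 cur_even -= 2
--             c = cur_even
--         else:
--             while cnt.get(cur_odd, 0) == 0:
--                 cur_odd -= 2
--             c = cur_odd
--         yield c
--         cnt[c] = cnt[c] - 1
-- ===== Notes on version B (the rewrite author's own statement) =====
-- stated objective: alternative
-- what changed: Replaces the two reversed comparison sorts and iterator consumption with a counting pass (a digit-frequency dict) plus a descending cursor per parity that emits the largest remaining digit of the matching parity and decrements its count.
import Mathlib
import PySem

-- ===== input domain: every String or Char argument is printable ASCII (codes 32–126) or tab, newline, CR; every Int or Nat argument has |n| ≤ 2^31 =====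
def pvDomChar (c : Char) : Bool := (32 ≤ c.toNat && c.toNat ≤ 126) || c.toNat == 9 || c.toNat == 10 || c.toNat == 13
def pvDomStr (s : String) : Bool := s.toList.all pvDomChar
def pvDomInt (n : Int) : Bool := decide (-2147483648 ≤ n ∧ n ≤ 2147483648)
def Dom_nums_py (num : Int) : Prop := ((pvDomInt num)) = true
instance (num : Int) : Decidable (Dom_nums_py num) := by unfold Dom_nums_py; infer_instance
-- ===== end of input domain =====

-- B replaces A's two reversed comparison sorts and iterator consumption by a digit-count
-- dictionary with a descending cursor per parity (counting sort); same stream of values.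

-- ===== PORT A =====
-- shared digit parse: [int(d) for d in str(num)]; int(c) for a decimal digit char c is
-- exactly c.toNat - 48 (Pre_ restricts to num ≥ 0, where every char of str(num) is a digit)
def pvDigits (num : Int) : List Int :=
  (PySem.Int.toChars num).map (fun c => ((c.toNat : Int) - 48))

-- the for-loop: pop the next element of e or o according to the parity of d
def pvConsumeA : List Int → List Int → List Int → List Int
  | [], _, _ => []
  | d :: ds, e, o =>
    if PySem.Int.mod d 2 == 0 then
      match e with
      | [] => []            -- next(e) on an exhausted iterator: unreachable
      | x :: e' => x :: pvConsumeA ds e' o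
    else
      match o with
      | [] => []            -- next(o) on an exhausted iterator: unreachable
      | y :: o' => y :: pvConsumeA ds e o'

def nums_py (num : Int) : List Int :=
  let digits := pvDigits num
  let e := (PySem.List.sorted (digits.filter (fun d => PySem.Int.mod d 2 == 0)) (fun x => x) false).reverse
  let o := (PySem.List.sorted (digits.filter (fun d => !(PySem.Int.mod d 2 == 0))) (fun x => x) false).reverse
  pvConsumeA digits e o

-- ===== PORT B =====
-- the while-loop: step the cursor down by 2 until its count is nonzero (fuel 6 only
-- makes the recursion total; under Pre_ at most 5 slots 8,6,4,2,0 resp. 9,7,5,3,1 are visited)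
def pvFindC (cnt : PySem.Dict Int Int) (c : Int) : Nat → Int
  | 0 => c
  | fuel + 1 => if cnt.getD c 0 == 0 then pvFindC cnt (c - 2) fuel else c

-- the for-loop of Source B: find the matching-parity cursor value, emit it, decrement its count
def pvConsumeB : List Int → PySem.Dict Int Int → Int → Int → List Int
  | [], _, _, _ => []
  | d :: ds, cnt, curE, curO =>
    if PySem.Int.mod d 2 == 0 then
      let c := pvFindC cnt curE 6
      c :: pvConsumeB ds (cnt.insert c (cnt.getD c 0 - 1)) c curO
    else
      let c := pvFindC cnt curO 6
      c :: pvConsumeB ds (cnt.insert c (cnt.getD c 0 - 1)) curE c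

def nums_py_alt (num : Int) : List Int :=
  let digits := pvDigits num
  let cnt := digits.foldl (fun d x => d.insert x (d.getD x 0 + 1)) PySem.Dict.empty
  pvConsumeB digits cnt 8 9

-- ===== PRECONDITION & SPEC =====
-- Pre_ excludes negative num, on which A (and B) raise ValueError: int('-') on the sign character.
def Pre_nums_py (num : Int) : Prop := 0 ≤ num
instance (num : Int) : Decidable (Pre_nums_py num) := by unfold Pre_nums_py; infer_instance
def pvWitness_nums_py : Int := (2736)

def Spec_nums_py (num : Int) (out : List Int) : Prop := out = nums_py_alt num
instance (num : Int) (out : List Int) : Decidable (Spec_nums_py num out) := by unfold Spec_nums_py; infer_instance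

-- ===== CLAIM (what is proved, stated in full; the proofs are below) =====
def Claim_equal_nums_py : Prop := ∀ (num : Int), Dom_nums_py num → Pre_nums_py num → Spec_nums_py num (nums_py num)

-- ===== LEMMAS AND PROOFS =====

-- the descending per-parity queue: value c repeated (f c) times, then c-2, c-4, … down to 0/1
def pvDesc (f : Int → Int) (c : Int) : List Int :=
  if c < 0 then [] else List.replicate (f c).toNat c ++ pvDesc f (c - 2)
termination_by (c + 2).toNat
decreasing_by omega

theorem pvDesc_congr (f g : Int → Int) (c : Int)
    (h : ∀ k, k ≤ c → (c - k) % 2 = 0 → f k = g k) : pvDesc f c = pvDesc g c := by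
  induction c using pvDesc.induct with
  | case1 c hc =>
    conv_lhs => rw [pvDesc]
    conv_rhs => rw [pvDesc]
    simp [hc]
  | case2 c hc ih =>
    conv_lhs => rw [pvDesc]
    conv_rhs => rw [pvDesc]
    simp only [if_neg hc]
    rw [h c (le_refl c) (by omega), ih (fun k hk hp => h k (by omega) (by omega))]

theorem pvDesc_count (f : Int → Int) (c x : Int) :
    (pvDesc f c).count x = if 0 ≤ x ∧ x ≤ c ∧ (c - x) % 2 = 0 then (f x).toNat else 0 := by
  induction c using pvDesc.induct with
  | case1 c hc => rw [pvDesc]; simp only [if_pos hc, List.count_nil]; split_ifs <;> omega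
  | case2 c hc ih =>
    rw [pvDesc]
    simp only [if_neg hc, List.count_append, List.count_replicate, ih]
    by_cases hx : x = c
    · subst hx
      simp only [beq_self_eq_true, if_pos]
      have h2 : ¬ (0 ≤ x ∧ x ≤ x - 2 ∧ (x - 2 - x) % 2 = 0) := by omega
      rw [if_neg h2, if_pos (by omega)]
      simp
    · rw [if_neg (by simpa using fun he => hx he.symm)]
      split_ifs with h1 h2 h2 <;> omega

theorem pvDesc_mem (f : Int → Int) (c x : Int) (h : x ∈ pvDesc f c) : 0 ≤ x ∧ x ≤ c := by
  have hcount := pvDesc_count f c x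
  rw [← List.count_pos_iff] at h
  by_contra hcon
  rw [if_neg (by omega)] at hcount
  omega

theorem pvDesc_pairwise (f : Int → Int) (c : Int) :
    (pvDesc f c).Pairwise (fun a b => b ≤ a) := by
  induction c using pvDesc.induct with
  | case1 c hc => rw [pvDesc]; simp [hc]
  | case2 c hc ih =>
    rw [pvDesc]
    simp only [if_neg hc]
    refine List.pairwise_append.mpr ⟨?_, ih, ?_⟩
    · rw [List.pairwise_replicate]; right; rfl
    · intro a ha b hb
      have hb' := pvDesc_mem f (c - 2) b hb
      have ha' := List.eq_of_mem_replicate ha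
      omega

theorem pvDesc_cons (f : Int → Int) (c x : Int) (t : List Int)
    (hpos : ∀ k, 0 ≤ f k) :
    pvDesc f c = x :: t → 0 ≤ x ∧ x ≤ c ∧ (c - x) % 2 = 0 ∧ 1 ≤ f x := by
  induction c using pvDesc.induct with
  | case1 c hc => intro h; rw [pvDesc] at h; simp [hc] at h
  | case2 c hc ih =>
    intro h
    rw [pvDesc] at h
    simp only [if_neg hc] at h
    by_cases hz : (f c).toNat = 0
    · rw [hz] at h
      simp only [List.replicate_zero, List.nil_append] at h
      have hx := ih h
      refine ⟨by omega, by omega, by omega, hx.2.2.2⟩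
    · obtain ⟨n, hn⟩ : ∃ n, (f c).toNat = n + 1 := ⟨(f c).toNat - 1, by omega⟩
      rw [hn, List.replicate_succ] at h
      simp only [List.cons_append, List.cons.injEq] at h
      obtain ⟨hxc, -⟩ := h
      subst hxc
      have hfc := hpos c
      exact ⟨by omega, by omega, by omega, by omega⟩

theorem pvDesc_pop (f : Int → Int) (c x : Int) (t : List Int)
    (hpos : ∀ k, 0 ≤ f k) :
    pvDesc f c = x :: t → t = pvDesc (fun k => if k = x then f k - 1 else f k) x := by
  induction c using pvDesc.induct with
  | case1 c hc => intro h; rw [pvDesc] at h; simp [hc] at h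
  | case2 c hc ih =>
    intro h
    rw [pvDesc] at h
    simp only [if_neg hc] at h
    by_cases hz : (f c).toNat = 0
    · rw [hz] at h
      simp only [List.replicate_zero, List.nil_append] at h
      exact ih h
    · obtain ⟨n, hn⟩ : ∃ n, (f c).toNat = n + 1 := ⟨(f c).toNat - 1, by omega⟩
      rw [hn, List.replicate_succ] at h
      simp only [List.cons_append, List.cons.injEq] at h
      obtain ⟨hxc, ht⟩ := h
      subst hxc
      rw [← ht]
      conv_rhs => rw [pvDesc]
      simp only [if_neg hc, if_true]
      have hfc := hpos c
      have h1 : (f c - 1).toNat = n := by omega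
      rw [h1]
      congr 1
      apply pvDesc_congr
      intro k hk hp
      rw [if_neg (by omega)]

theorem pvFindC_eq (cnt : PySem.Dict Int Int) (c x : Int) (t : List Int) (m : Nat)
    (hpos : ∀ k, 0 ≤ cnt.getD k 0)
    (h : pvDesc (fun k => cnt.getD k 0) c = x :: t)
    (hm : c - x < 2 * (m : Int)) :
    pvFindC cnt c m = x := by
  induction m generalizing c t with
  | zero =>
    have := pvDesc_cons _ c x t hpos h
    omega
  | succ m ih =>
    have hc := pvDesc_cons _ c x t hpos h
    rw [pvFindC]
    by_cases hz : cnt.getD c 0 = 0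
    · rw [if_pos (by simpa using hz)]
      rw [pvDesc] at h
      rw [if_neg (by omega), hz] at h
      simp only [Int.toNat_zero, List.replicate_zero, List.nil_append] at h
      have hx : x ≠ c := by
        intro he; subst he; have := hpos x; omega
      have := pvDesc_cons _ (c - 2) x t hpos h
      exact ih (c - 2) t h (by omega)
    · rw [if_neg (by simpa using hz)]
      rw [pvDesc] at h
      rw [if_neg (by omega)] at h
      have hn : ∃ n, (cnt.getD c 0).toNat = n + 1 := ⟨(cnt.getD c 0).toNat - 1, by have := hpos c; omega⟩
      obtain ⟨n, hn⟩ := hn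
      rw [hn, List.replicate_succ] at h
      simp only [List.cons_append, List.cons.injEq] at h
      omega

theorem pvMain (ds : List Int) (cnt : PySem.Dict Int Int) (curE curO : Int) (e o : List Int)
    (hpos : ∀ k, 0 ≤ cnt.getD k 0)
    (hE : e = pvDesc (fun k => cnt.getD k 0) curE)
    (hO : o = pvDesc (fun k => cnt.getD k 0) curO)
    (hcE : curE ≤ 8) (hcO : curO ≤ 9)
    (hpE : curE % 2 = 0) (hpO : curO % 2 = 1)
    (hds : ∀ d ∈ ds, 0 ≤ d ∧ d ≤ 9)
    (hlE : e.length = (ds.filter (fun d => PySem.Int.mod d 2 == 0)).length)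
    (hlO : o.length = (ds.filter (fun d => !(PySem.Int.mod d 2 == 0))).length) :
    pvConsumeA ds e o = pvConsumeB ds cnt curE curO := by
  induction ds generalizing cnt curE curO e o with
  | nil => rfl
  | cons d ds ih =>
    rw [List.filter_cons] at hlE hlO
    by_cases hb : (PySem.Int.mod d 2 == 0) = true
    · -- even digit
      rw [if_pos hb] at hlE
      rw [if_neg (by rw [hb]; decide)] at hlO
      cases e with
      | nil => simp at hlE
      | cons x e' =>
        have hcons := pvDesc_cons _ curE x e' hpos hE.symm
        have hfind : pvFindC cnt curE 6 = x :=
          pvFindC_eq cnt curE x e' 6 hpos hE.symm (by omega)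
        have hpop := pvDesc_pop _ curE x e' hpos hE.symm
        simp only [pvConsumeA, pvConsumeB, if_pos hb, hfind]
        congr 1
        have hfun : (fun k => (cnt.insert x (cnt.getD x 0 - 1)).getD k 0)
            = (fun k => if k = x then cnt.getD k 0 - 1 else cnt.getD k 0) := by
          funext k
          rw [PySem.Dict.getD_insert]
          split_ifs with hk
          · subst hk; rfl
          · rfl
        obtain ⟨hx0, hx1, hx2, hx3⟩ := hcons
        apply ih
        · intro k
          rw [PySem.Dict.getD_insert]
          split_ifs with hk
          · omega
          · exact hpos k
        · rw [hfun]; exact hpop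
        · rw [hfun, hO]
          apply pvDesc_congr
          intro k hk hp
          rw [if_neg (by omega)]
        · omega
        · exact hcO
        · omega
        · exact hpO
        · intro a ha; exact hds a (List.mem_cons_of_mem d ha)
        · simp only [List.length_cons] at hlE; omega
        · exact hlO
    · -- odd digit
      have hbf : (PySem.Int.mod d 2 == 0) = false := by
        revert hb; cases (PySem.Int.mod d 2 == 0) <;> simp
      rw [if_neg hb] at hlE
      rw [if_pos (by rw [hbf]; decide)] at hlO
      cases o with
      | nil => simp at hlO
      | cons y o' =>
        have hcons := pvDesc_cons _ curO y o' hpos hO.symm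
        have hfind : pvFindC cnt curO 6 = y :=
          pvFindC_eq cnt curO y o' 6 hpos hO.symm (by omega)
        have hpop := pvDesc_pop _ curO y o' hpos hO.symm
        simp only [pvConsumeA, pvConsumeB, if_neg hb, hfind]
        congr 1
        have hfun : (fun k => (cnt.insert y (cnt.getD y 0 - 1)).getD k 0)
            = (fun k => if k = y then cnt.getD k 0 - 1 else cnt.getD k 0) := by
          funext k
          rw [PySem.Dict.getD_insert]
          split_ifs with hk
          · subst hk; rfl
          · rfl
        obtain ⟨hy0, hy1, hy2, hy3⟩ := hcons
        apply ih
        · intro k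
          rw [PySem.Dict.getD_insert]
          split_ifs with hk
          · omega
          · exact hpos k
        · rw [hfun, hE]
          apply pvDesc_congr
          intro k hk hp
          rw [if_neg (by omega)]
        · rw [hfun]; exact hpop
        · exact hcE
        · omega
        · exact hpE
        · omega
        · intro a ha; exact hds a (List.mem_cons_of_mem d ha)
        · exact hlE
        · simp only [List.length_cons] at hlO; omega

theorem pvMod2 (d : Int) : PySem.Int.mod d 2 = d % 2 := by
  simp [PySem.Int.mod, Int.fmod_eq_emod]

theorem pvDigitChar_range (m : Nat) (h : m < 10) :
    48 ≤ (Nat.digitChar m).toNat ∧ (Nat.digitChar m).toNat ≤ 57 := by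
  interval_cases m <;> decide

theorem pvToDigitsCore_range (f : Nat) : ∀ (n : Nat) (ds : List Char),
    (∀ c ∈ ds, 48 ≤ c.toNat ∧ c.toNat ≤ 57) →
    ∀ c ∈ Nat.toDigitsCore 10 f n ds, 48 ≤ c.toNat ∧ c.toNat ≤ 57 := by
  induction f with
  | zero => intro n ds hds c hc; exact hds c hc
  | succ f ih =>
    intro n ds hds c hc
    rw [Nat.toDigitsCore] at hc
    split at hc
    · rcases List.mem_cons.mp hc with h | h
      · subst h; exact pvDigitChar_range _ (Nat.mod_lt _ (by norm_num))
      · exact hds c h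
    · refine ih _ _ ?_ c hc
      intro c' hc'
      rcases List.mem_cons.mp hc' with h | h
      · subst h; exact pvDigitChar_range _ (Nat.mod_lt _ (by norm_num))
      · exact hds c' h

theorem pvDigits_range (num : Int) (h : 0 ≤ num) :
    ∀ d ∈ pvDigits num, 0 ≤ d ∧ d ≤ 9 := by
  intro d hd
  unfold pvDigits at hd
  rw [List.mem_map] at hd
  obtain ⟨c, hc, rfl⟩ := hd
  unfold PySem.Int.toChars at hc
  rw [if_neg (by omega)] at hc
  have := pvToDigitsCore_range (num.toNat + 1) num.toNat [] (by simp) c hc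
  omega

-- initial queues: reversed(sorted(·)) of each parity class is pvDesc of the digit counter
-- initial queues: reversed(sorted(·)) of each parity class is pvDesc of the digit counter
theorem pvInitQueue (digits : List Int) (c0 : Int) (p : Int → Bool)
    (hrange : ∀ d ∈ digits, 0 ≤ d ∧ d ≤ 9)
    (hslot : ∀ a : Int, (0 ≤ a ∧ a ≤ c0 ∧ (c0 - a) % 2 = 0 ∧ a ≤ 9) ↔ (0 ≤ a ∧ a ≤ 9 ∧ p a = true)) :
    (PySem.List.sorted (digits.filter p) (fun x => x) false).reverse
      = pvDesc (fun k => (PySem.Dict.counter digits).getD k 0) c0 := by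
  have key : PySem.List.sorted (digits.filter p) (fun x => x) false
      = (pvDesc (fun k => (PySem.Dict.counter digits).getD k 0) c0).reverse := by
    apply PySem.List.sorted_id_eq_of_perm_of_pairwise
    · rw [List.perm_iff_count]
      intro a
      rw [List.count_reverse, pvDesc_count]
      by_cases hp : p a = true
      · rw [List.count_filter hp]
        by_cases ha : a ∈ digits
        · have hr := hrange a ha
          obtain ⟨h1, h2, h3, _⟩ := (hslot a).mpr ⟨hr.1, hr.2, hp⟩
          rw [if_pos ⟨h1, h2, h3⟩, PySem.Dict.getD_counter]
          simp
        · have hz := List.count_eq_zero.mpr ha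
          rw [hz, PySem.Dict.getD_counter, hz]
          simp
      · have hnotin : a ∉ List.filter p digits := fun hmem => hp (List.mem_filter.mp hmem).2
        rw [List.count_eq_zero.mpr hnotin, PySem.Dict.getD_counter]
        by_cases ha : a ∈ digits
        · have hr := hrange a ha
          rw [if_neg]
          intro hcon
          exact hp ((hslot a).mp ⟨hcon.1, hcon.2.1, hcon.2.2, hr.2⟩).2.2
        · rw [List.count_eq_zero.mpr ha]
          split_ifs <;> simp
    · rw [List.pairwise_reverse]
      exact pvDesc_pairwise _ c0
  rw [key, List.reverse_reverse]

-- ===== VERDICT (by name: the statement is the Claim_ definition above) =====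
theorem nums_py_spec : Claim_equal_nums_py := by
  intro num _ hpre
  unfold Spec_nums_py nums_py nums_py_alt
  dsimp only
  rw [PySem.Dict.foldl_insert_getD_add_one_eq_counter]
  have hrange := pvDigits_range num hpre
  have hpos : ∀ k : Int, 0 ≤ (PySem.Dict.counter (pvDigits num)).getD k 0 := by
    intro k; rw [PySem.Dict.getD_counter]; positivity
  have hE := pvInitQueue (pvDigits num) 8 (fun d => PySem.Int.mod d 2 == 0) hrange ?_
  · have hO := pvInitQueue (pvDigits num) 9 (fun d => !(PySem.Int.mod d 2 == 0)) hrange ?_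
    · apply pvMain _ _ _ _ _ _ hpos hE hO (by omega) (by omega) (by omega) (by omega) hrange
      · rw [List.length_reverse]
        exact (PySem.List.sorted_perm _ _ _).length_eq
      · rw [List.length_reverse]
        exact (PySem.List.sorted_perm _ _ _).length_eq
    · intro a
      constructor
      · rintro ⟨h1, h2, h3, h4⟩
        refine ⟨h1, h4, ?_⟩
        simp only [pvMod2]
        simp only [Bool.not_eq_true', beq_eq_false_iff_ne, ne_eq]
        omega
      · rintro ⟨h1, h2, h3⟩
        simp only [pvMod2, Bool.not_eq_true', beq_eq_false_iff_ne, ne_eq] at h3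
        refine ⟨h1, by omega, by omega, h2⟩
  · intro a
    constructor
    · rintro ⟨h1, h2, h3, h4⟩
      refine ⟨h1, h4, ?_⟩
      simp only [pvMod2, beq_iff_eq]
      omega
    · rintro ⟨h1, h2, h3⟩
      simp only [pvMod2, beq_iff_eq] at h3
      refine ⟨h1, by omega, by omega, h2⟩
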